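-- pv_equiv track=rewrite | github.com/SanittaRR/aaa_algorithms_heaps | task1.py | get_kth_element
-- ===== SOURCE A (Python) =====
-- def get_kth_element(arr: list, k: int):
--     def max_heapify_sized(arr: list, i: int, size: int):
--         left = i * 2 + 1
--         right = i * 2 + 2
--         if left >= size:
--             return
--
--         if right < len(arr) and arr[left] < arr[right]:
--             index_to_swap = right
--             value_to_swap = arr[right]
--         else:
--             index_to_swap = left
--             value_to_swap = arr[left]
--         if arr[i] < value_to_swap:
--             arr[i], arr[index_to_swap] = arr[index_to_swap], arr[i]
--             max_heapify_sized(arr, index_to_swap, size)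
--         return arr
--
--     def build_max_heap(arr: list):
--         for i in range(len(arr) // 2, -1, -1):
--             max_heapify_sized(arr, i, len(arr))
--         return arr
--
--     def heapsort(arr: list):
--         build_max_heap(arr)
--         for i in range(len(arr) - 1, 0, -1):
--             if arr[0] > arr[i]:
--                 arr[0], arr[i] = arr[i], arr[0]
--             max_heapify_sized(arr, 0, i - 1)
--         return arr
--
--     arr = heapsort(arr)
--     return arr[k]
-- ===== SOURCE B (Python) =====
-- def get_kth_element(arr: list, k: int):
--     # Same buggy heapsort behaviour, but with an iterative sift-down and no
--     # build/heapsort helper decomposition.  Mutates arr in place like the original.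
--     n = len(arr)
--
--     def sift(i, size):
--         while True:
--             left = 2 * i + 1
--             if left >= size:
--                 return
--             right = left + 1
--             j = right if (right < n and arr[left] < arr[right]) else left
--             if arr[i] < arr[j]:
--                 arr[i], arr[j] = arr[j], arr[i]
--                 i = j
--             else:
--                 return
--
--     for i in range(n // 2, -1, -1):
--         sift(i, n)
--     for i in range(n - 1, 0, -1):
--         if arr[0] > arr[i]:
--             arr[0], arr[i] = arr[i], arr[0]
--         sift(0, i - 1)
--     return arr[k]
-- ===== Notes on version B (the rewrite author's own statement) =====
-- stated objective: simpler
-- what changed: Recursive max_heapify_sized is replaced by an iterative while-loop sift-down, and the build_max_heap/heapsort helper functions are flattened into two plain loops in the main function; arr[k] indexing out of range (or empty arr) is excluded by Pre_ because A raises IndexError there.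
import Mathlib
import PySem

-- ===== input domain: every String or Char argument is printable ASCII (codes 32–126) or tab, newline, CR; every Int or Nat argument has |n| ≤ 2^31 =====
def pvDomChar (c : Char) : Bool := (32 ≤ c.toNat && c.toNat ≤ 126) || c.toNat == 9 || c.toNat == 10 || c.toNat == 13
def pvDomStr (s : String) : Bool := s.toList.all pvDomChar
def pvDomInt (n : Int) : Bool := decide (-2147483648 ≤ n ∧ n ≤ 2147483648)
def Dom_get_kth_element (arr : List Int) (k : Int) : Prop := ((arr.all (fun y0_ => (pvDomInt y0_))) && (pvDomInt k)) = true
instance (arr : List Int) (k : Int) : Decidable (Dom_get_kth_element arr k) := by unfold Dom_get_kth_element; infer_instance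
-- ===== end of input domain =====

-- B flattens A's recursive max_heapify_sized into an iterative sift-down and inlines the
-- build/heapsort helpers into two plain loops (objective: simpler); like A, the Python B
-- sorts the caller's list in place — the theorem is about the return value arr[k].


-- ===== PORT A =====
-- recursive max_heapify_sized (all list accesses are in range on every reachable call, so
-- getD 0 is exact; the buggy `right < len(arr)` test is kept as `right < arr.length`).
-- `fuel` is only a totality guard: the sift index at least doubles each call and recursion
-- requires it to stay below `size`, so fuel = size (passed at every call site) never runs out.
def pvHeapifyA : Nat → List Int → Nat → Nat → List Int
  | 0, arr, _, _ => arr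
  | fuel + 1, arr, i, size =>
    if 2 * i + 1 ≥ size then arr
    else
      let idx := if 2 * i + 2 < arr.length ∧ arr.getD (2 * i + 1) 0 < arr.getD (2 * i + 2) 0
        then 2 * i + 2 else 2 * i + 1
      if arr.getD i 0 < arr.getD idx 0 then
        pvHeapifyA fuel ((arr.set i (arr.getD idx 0)).set idx (arr.getD i 0)) idx size
      else arr

-- build_max_heap: for i in range(len(arr)//2, -1, -1)
def pvBuildA (arr : List Int) : List Int :=
  ((List.range (arr.length / 2 + 1)).reverse).foldl (fun l i => pvHeapifyA l.length l i l.length) arr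

-- heapsort: build, then for i in range(len(arr)-1, 0, -1)
def pvHeapsortA (arr : List Int) : List Int :=
  ((List.range' 1 ((pvBuildA arr).length - 1)).reverse).foldl
    (fun l i =>
      pvHeapifyA (i - 1)
        (if l.getD 0 0 > l.getD i 0 then (l.set 0 (l.getD i 0)).set i (l.getD 0 0) else l)
        0 (i - 1)) (pvBuildA arr)

def get_kth_element (arr : List Int) (k : Int) : Int :=
  (PySem.List.pyGet? (pvHeapsortA arr) k).getD 0

-- ===== PORT B =====
-- iterative sift-down: the `while True` loop becomes fuel recursion on the moving index i
-- (fuel = size at every call site, never exhausted for the same reason as above)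
def pvSiftB : Nat → Array Int → Nat → Nat → Nat → Array Int
  | 0, a, _, _, _ => a
  | fuel + 1, a, n, i, size =>
    if 2 * i + 1 ≥ size then a
    else
      let j := if 2 * i + 1 + 1 < n ∧ a.getD (2 * i + 1) 0 < a.getD (2 * i + 1 + 1) 0
        then 2 * i + 1 + 1 else 2 * i + 1
      if a.getD i 0 < a.getD j 0 then
        pvSiftB fuel ((a.setIfInBounds i (a.getD j 0)).setIfInBounds j (a.getD i 0)) n j size
      else a

-- first loop: i from n//2 down to 0
def pvBuildB (a : Array Int) (n : Nat) : Nat → Array Int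
  | 0 => pvSiftB n a n 0 n
  | Nat.succ m => pvBuildB (pvSiftB n a n (m + 1) n) n m

-- second loop: i from n-1 down to 1 (argument is the current i)
def pvExtractB (a : Array Int) (n : Nat) : Nat → Array Int
  | 0 => a
  | Nat.succ m =>
    let a2 := if a.getD 0 0 > a.getD (m + 1) 0 then
        (a.setIfInBounds 0 (a.getD (m + 1) 0)).setIfInBounds (m + 1) (a.getD 0 0)
      else a
    pvExtractB (pvSiftB m a2 n 0 m) n m

def get_kth_element_alt (arr : List Int) (k : Int) : Int :=
  (PySem.List.pyGet?
    (pvExtractB (pvBuildB arr.toArray arr.length (arr.length / 2)) arr.length (arr.length - 1)).toList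
    k).getD 0

-- ===== PRECONDITION & SPEC =====
-- Pre_ excludes exactly the inputs where A's final `arr[k]` raises IndexError (k out of range).
def Pre_get_kth_element (arr : List Int) (k : Int) : Prop :=
  PySem.Raise.InRange arr.length k
instance (arr : List Int) (k : Int) : Decidable (Pre_get_kth_element arr k) := by
  unfold Pre_get_kth_element; infer_instance
def pvWitness_get_kth_element : List Int × Int := ([3, 1, 2], 0)

def Spec_get_kth_element (arr : List Int) (k : Int) (out : Int) : Prop := out = get_kth_element_alt arr k
instance (arr : List Int) (k : Int) (out : Int) : Decidable (Spec_get_kth_element arr k out) := by unfold Spec_get_kth_element; infer_instance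

-- ===== CLAIM (what is proved, stated in full; the proofs are below) =====
def Claim_equal_get_kth_element : Prop := ∀ (arr : List Int) (k : Int), Dom_get_kth_element arr k → Pre_get_kth_element arr k → Spec_get_kth_element arr k (get_kth_element arr k)

-- ===== LEMMAS AND PROOFS =====

theorem arrGetD (a : Array Int) (i : Nat) : a.getD i 0 = a.toList.getD i 0 := by
  simp [Array.getD, List.getD]
  split <;> simp_all

theorem heapifyA_len (fuel : Nat) (arr : List Int) (i size : Nat) :
    (pvHeapifyA fuel arr i size).length = arr.length := by
  fun_induction pvHeapifyA fuel arr i size <;> simp_all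

theorem pvSiftB_size (fuel : Nat) (a : Array Int) (n i size : Nat) :
    (pvSiftB fuel a n i size).size = a.size := by
  fun_induction pvSiftB fuel a n i size <;> simp_all

theorem pvBuildB_size (a : Array Int) (n i : Nat) :
    (pvBuildB a n i).size = a.size := by
  induction i generalizing a <;> simp_all [pvBuildB, pvSiftB_size]

theorem foldl_heapify_len (L : List Nat) (l : List Int) :
    (L.foldl (fun l i => pvHeapifyA l.length l i l.length) l).length = l.length := by
  induction L generalizing l <;> simp_all [heapifyA_len]

theorem sift_eq (fuel : Nat) : ∀ (i size : Nat) (a : Array Int) (n : Nat), n = a.size →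
    (pvSiftB fuel a n i size).toList = pvHeapifyA fuel a.toList i size := by
  induction fuel with
  | zero => intro i size a n _; rfl
  | succ fuel ih =>
    intro i size a n hn
    rw [pvSiftB, pvHeapifyA]
    by_cases hls : 2 * i + 1 ≥ size
    · rw [if_pos hls, if_pos hls]
    · rw [if_neg hls, if_neg hls]
      subst hn
      simp only [arrGetD, ← Array.length_toList]
      have e : 2 * i + 1 + 1 = 2 * i + 2 := by omega
      rw [e]
      set j := if 2 * i + 2 < a.toList.length ∧ a.toList.getD (2 * i + 1) 0 < a.toList.getD (2 * i + 2) 0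
        then 2 * i + 2 else 2 * i + 1 with hj
      by_cases hsw : a.toList.getD i 0 < a.toList.getD j 0
      · rw [if_pos hsw, if_pos hsw]
        rw [show (a.setIfInBounds i (a.toList.getD j 0)).setIfInBounds j (a.toList.getD i 0)
              = ((a.toList.set i (a.toList.getD j 0)).set j (a.toList.getD i 0)).toArray by
            apply Array.ext'; simp [Array.toList_setIfInBounds]] at *
        rw [ih j size _ _ (by simp)]
      · rw [if_neg hsw, if_neg hsw]

theorem build_eq (i : Nat) (a : Array Int) (n : Nat) (hn : n = a.size) :
    (pvBuildB a n i).toList =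
      ((List.range (i + 1)).reverse).foldl (fun l j => pvHeapifyA l.length l j l.length) a.toList := by
  induction i generalizing a with
  | zero =>
    show (pvSiftB n a n 0 n).toList = _
    rw [show ((List.range (0 + 1)).reverse) = [0] from rfl]
    simp only [List.foldl_cons, List.foldl_nil]
    rw [sift_eq n 0 n a n hn]
    congr 1
  | succ m ih =>
    rw [pvBuildB]
    rw [ih _ (by simp [pvSiftB_size, hn])]
    rw [List.range_succ (n := m + 1), List.reverse_append]
    simp only [List.reverse_singleton, List.singleton_append, List.foldl_cons]
    congr 1
    rw [sift_eq n (m + 1) n a n hn]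
    congr 1

theorem extract_eq (i : Nat) (a : Array Int) (n : Nat) (hn : n = a.size) :
    (pvExtractB a n i).toList =
      ((List.range' 1 i).reverse).foldl
        (fun l j =>
          pvHeapifyA (j - 1)
            (if l.getD 0 0 > l.getD j 0 then (l.set 0 (l.getD j 0)).set j (l.getD 0 0) else l)
            0 (j - 1)) a.toList := by
  induction i generalizing a with
  | zero => simp [pvExtractB]
  | succ m ih =>
    rw [pvExtractB]
    have hr : List.range' 1 (m + 1) = List.range' 1 m ++ [m + 1] := by
      simpa [Nat.add_comm] using List.range'_concat (s := 1) (n := m) (step := 1)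
    rw [hr, List.reverse_append]
    simp only [List.reverse_singleton, List.singleton_append, List.foldl_cons]
    set a2 := if a.getD 0 0 > a.getD (m + 1) 0 then
        (a.setIfInBounds 0 (a.getD (m + 1) 0)).setIfInBounds (m + 1) (a.getD 0 0)
      else a with ha2
    have ha2sz : n = a2.size := by rw [ha2]; split <;> simp [hn]
    have ha2l : a2.toList = (if a.toList.getD 0 0 > a.toList.getD (m + 1) 0 then
        (a.toList.set 0 (a.toList.getD (m + 1) 0)).set (m + 1) (a.toList.getD 0 0) else a.toList) := by
      rw [ha2]; simp only [← arrGetD]; split <;> simp [Array.toList_setIfInBounds]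
    rw [ih _ (by simp [pvSiftB_size, ha2sz])]
    congr 1
    rw [sift_eq m 0 m a2 n ha2sz, ha2l]
    simp

theorem get_kth_element_spec : Claim_equal_get_kth_element := by
  intro arr k _ _
  show get_kth_element arr k = get_kth_element_alt arr k
  unfold get_kth_element get_kth_element_alt
  have hb := build_eq (arr.length / 2) arr.toArray arr.length (by simp)
  have he := extract_eq (arr.length - 1) (pvBuildB arr.toArray arr.length (arr.length / 2))
    arr.length (by simp [pvBuildB_size])
  rw [he, hb]
  unfold pvHeapsortA pvBuildA
  rw [foldl_heapify_len]
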